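-- pv_equiv track=rewrite | github.com/youlostd/NoahGameFrame | Diamas Project/source/src/client/script/inGameWikiUI.py | MakeMoneyText
-- ===== SOURCE A (Python) =====
-- def MakeMoneyText(money):
--     money = str(money)
--     original = money
--     sLen = len(original)
--     while sLen > 3 and original[sLen - 3 :] == "000":
--         money = money[::-1].replace("000"[::-1], "k"[::-1], 1)[::-1]
--         original = original[: sLen - 3]
--         sLen -= 3
--
--     return money
-- ===== SOURCE B (Python) =====
-- def MakeMoneyText(money):
--     s = str(money)
--     z = len(s) - len(s.rstrip('0'))
--     k = min(z // 3, (len(s) - 1) // 3)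
--     return s[:len(s) - 3 * k] + 'k' * k
-- ===== Notes on version B (the rewrite author's own statement) =====
-- stated objective: simpler
-- what changed: A's while-loop that repeatedly reverses the string and replaces the last zero-triple with 'k' is replaced by a closed form: count the trailing zeros once, derive the number of 'k' suffixes by integer division (capped by the loop's length bound), and build the result with one slice and one repetition.
import Mathlib
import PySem

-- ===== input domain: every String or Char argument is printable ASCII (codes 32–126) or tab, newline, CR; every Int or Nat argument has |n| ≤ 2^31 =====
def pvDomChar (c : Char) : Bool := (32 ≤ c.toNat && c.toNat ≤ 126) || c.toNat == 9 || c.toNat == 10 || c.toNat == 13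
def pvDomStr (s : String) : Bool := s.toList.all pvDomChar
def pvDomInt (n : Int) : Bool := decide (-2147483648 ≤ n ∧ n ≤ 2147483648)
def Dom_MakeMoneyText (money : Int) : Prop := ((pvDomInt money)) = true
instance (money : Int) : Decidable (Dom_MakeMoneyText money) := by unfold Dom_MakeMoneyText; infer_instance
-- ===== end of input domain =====

-- B replaces A's iterative reverse-replace loop by a closed-form formula: count trailing
-- zeros once, derive how many 'k' suffixes A would produce, build the result directly
-- (objective: simpler).


-- ===== PORT A =====
-- str.replace(old, new, 1) has no PySem primitive with a count argument; hand port,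
-- exact for nonempty `old`: replaces the leftmost occurrence, returns s unchanged if none.
def replace1 (s old new : List Char) : List Char :=
  match s with
  | [] => []
  | c :: rest =>
      if old.isPrefixOf (c :: rest) then new ++ (c :: rest).drop old.length
      else c :: replace1 rest old new

-- the while-loop of A; `money[::-1]` is List.reverse (PySem.List.slice?_none_none_neg_one)
def mmtLoop (money original : List Char) (sLen : Nat) : List Char :=
  if h : sLen > 3 ∧ PySem.List.slice original (some ((sLen : Int) - 3)) none = ['0','0','0'] then
    mmtLoop ((replace1 money.reverse (['0','0','0'].reverse) (['k'].reverse)).reverse)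
            (PySem.List.slice original none (some ((sLen : Int) - 3)))
            (sLen - 3)
  else money
termination_by sLen
decreasing_by omega

def MakeMoneyText (money : Int) : String :=
  let s := PySem.Int.toChars money
  String.ofList (mmtLoop s s s.length)

-- ===== PORT B =====
-- s.rstrip('0') has no PySem primitive taking a chars argument; hand port, exact:
-- drop the trailing '0' run. s[:n] with n = len(s)-3*k ≥ 0 is List.take; 'k'*k is replicate.
def MakeMoneyText_alt (money : Int) : String :=
  let s := PySem.Int.toChars money
  let z := s.length - ((s.reverse.dropWhile (fun c => c = '0')).reverse).length
  let k := min (z / 3) ((s.length - 1) / 3)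
  String.ofList (s.take (s.length - 3 * k) ++ List.replicate k 'k')

-- ===== PRECONDITION & SPEC =====
def Spec_MakeMoneyText (money : Int) (out : String) : Prop := out = MakeMoneyText_alt money
instance (money : Int) (out : String) : Decidable (Spec_MakeMoneyText money out) := by unfold Spec_MakeMoneyText; infer_instance

-- ===== CLAIM (what is proved, stated in full; the proofs are below) =====
def Claim_equal_MakeMoneyText : Prop := ∀ (money : Int), Dom_MakeMoneyText money → Spec_MakeMoneyText money (MakeMoneyText money)

-- ===== LEMMAS AND PROOFS =====

-- trailing-zero count and A's iteration count, as functions of the current string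
def zfun (t : List Char) : Nat := (t.reverse.takeWhile (fun c => c = '0')).length
def kfun (t : List Char) : Nat := min (zfun t / 3) ((t.length - 1) / 3)

theorem replace1_repl_k (i : Nat) (u : List Char) :
    replace1 (List.replicate i 'k' ++ u) ['0','0','0'] ['k']
      = List.replicate i 'k' ++ replace1 u ['0','0','0'] ['k'] := by
  induction i with
  | zero => simp
  | succ n ih =>
    rw [List.replicate_succ, List.cons_append, replace1]
    rw [if_neg (by simp [List.isPrefixOf])]
    simp [ih]

theorem take3_iff_takeWhile (l : List Char) (hl : 3 ≤ l.length) :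
    l.take 3 = ['0','0','0'] ↔ 3 ≤ (l.takeWhile (fun c => c = '0')).length := by
  match l, hl with
  | a :: b :: c :: r, _ =>
    simp only [List.take, List.takeWhile]
    by_cases ha : a = '0' <;> by_cases hb : b = '0' <;> by_cases hc : c = '0' <;>
      simp [ha, hb, hc]

theorem replace1_of_take3 (l : List Char) (h : l.take 3 = ['0','0','0']) :
    replace1 l ['0','0','0'] ['k'] = 'k' :: l.drop 3 := by
  match l with
  | a :: b :: c :: r =>
    simp only [List.take, List.cons.injEq] at h
    obtain ⟨ha, hb, hc, -⟩ := h
    subst ha; subst hb; subst hc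
    rw [replace1]
    simp [List.isPrefixOf]
  | [] => simp at h
  | [a] => simp at h
  | [a, b] => simp at h

theorem takeWhile_prefix_length (w : List Char) :
    (List.takeWhile (fun c => c = '0') ('0' :: '0' :: '0' :: w)).length
      = 3 + (List.takeWhile (fun c => c = '0') w).length := by
  simp [List.takeWhile]
  omega

theorem core (n : Nat) : ∀ (t : List Char) (i : Nat), t.length ≤ n →
    mmtLoop (t ++ List.replicate i 'k') t t.length
      = t.take (t.length - 3 * kfun t) ++ List.replicate (i + kfun t) 'k' := by
  induction n with
  | zero =>
    intro t i ht
    have : t = [] := List.eq_nil_of_length_eq_zero (by omega)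
    subst this
    rw [mmtLoop]
    simp [kfun, zfun]
  | succ n ih =>
    intro t i ht
    rw [mmtLoop]
    by_cases hc : t.length > 3 ∧ PySem.List.slice t (some ((t.length : Int) - 3)) none = ['0','0','0']
    · rw [dif_pos hc]
      obtain ⟨hlen, hslice⟩ := hc
      have hcast : ((t.length : Int) - 3) = ((t.length - 3 : Nat) : Int) := by omega
      rw [hcast] at hslice ⊢
      rw [PySem.List.slice_from_natCast] at hslice
      rw [PySem.List.slice_to_natCast]
      -- the last three chars of t are zeros, in reverse form
      have hrev3 : t.reverse.take 3 = ['0','0','0'] := by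
        have h := congrArg List.reverse hslice
        rw [List.reverse_drop] at h
        have h3 : t.length - (t.length - 3) = 3 := by omega
        rw [h3] at h
        simpa using h
      have hw : t.reverse = '0' :: '0' :: '0' :: t.reverse.drop 3 := by
        conv_lhs => rw [← List.take_append_drop 3 t.reverse, hrev3]
        rfl
      -- the replace step removes exactly the trailing "000"
      have hstep : ((replace1 (t ++ List.replicate i 'k').reverse (['0','0','0'].reverse) (['k'].reverse)).reverse)
          = t.take (t.length - 3) ++ List.replicate (i + 1) 'k' := by
        have e1 : (['0','0','0'] : List Char).reverse = ['0','0','0'] := rfl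
        have e2 : (['k'] : List Char).reverse = ['k'] := rfl
        have hrr : (t ++ List.replicate i 'k').reverse = List.replicate i 'k' ++ t.reverse := by
          rw [List.reverse_append, List.reverse_replicate]
        rw [e1, e2, hrr, replace1_repl_k, replace1_of_take3 _ hrev3]
        rw [List.reverse_append, List.reverse_cons]
        have hdr : (t.reverse.drop 3).reverse = t.take (t.length - 3) := by
          rw [List.reverse_drop, List.reverse_reverse, List.length_reverse]
        rw [hdr, List.reverse_replicate]
        simp [List.append_assoc, List.replicate_succ]
      rw [hstep]
      have hlt : (t.take (t.length - 3)).length = t.length - 3 := by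
        rw [List.length_take]; omega
      -- z decreases by exactly 3
      have hz3 : zfun t = zfun (t.take (t.length - 3)) + 3 := by
        unfold zfun
        rw [List.reverse_take]
        have h3 : t.length - (t.length - 3) = 3 := by omega
        rw [h3]
        conv_lhs => rw [hw]
        rw [takeWhile_prefix_length]
        omega
      have hzge : 3 ≤ zfun t := by omega
      have hk : kfun t = kfun (t.take (t.length - 3)) + 1 := by
        unfold kfun
        rw [hlt]
        omega
      have hIH := ih (t.take (t.length - 3)) (i + 1) (by omega)
      rw [hlt] at hIH
      rw [hIH]
      have h3k : 3 * kfun t ≤ t.length - 1 := by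
        have := min_le_right (zfun t / 3) ((t.length - 1) / 3)
        unfold kfun
        omega
      rw [List.take_take, hk]
      congr 1
      · congr 1
        omega
      · congr 1
        omega
    · rw [dif_neg hc]
      push Not at hc
      have hk0 : kfun t = 0 := by
        by_cases hlen : t.length > 3
        · have hs := hc hlen
          have hns : ¬ (3 ≤ zfun t) := by
            intro h3z
            apply hs
            have hcast : ((t.length : Int) - 3) = ((t.length - 3 : Nat) : Int) := by omega
            rw [hcast, PySem.List.slice_from_natCast]
            have hrev3 : t.reverse.take 3 = ['0','0','0'] := by
              rw [take3_iff_takeWhile _ (by rw [List.length_reverse]; omega)]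
              exact h3z
            have h := congrArg List.reverse hrev3
            rw [List.reverse_take, List.length_reverse, List.reverse_reverse] at h
            simpa using h
          unfold kfun
          omega
        · unfold kfun; omega
      rw [hk0]
      simp

-- ===== VERDICT (by name: the statement is the Claim_ definition above) =====
theorem MakeMoneyText_spec : Claim_equal_MakeMoneyText := by
  intro money _
  simp only [Spec_MakeMoneyText, MakeMoneyText, MakeMoneyText_alt]
  have h0 := core (PySem.Int.toChars money).length (PySem.Int.toChars money) 0 le_rfl
  simp only [List.replicate_zero, List.append_nil, Nat.zero_add] at h0
  rw [h0]
  have hz : (PySem.Int.toChars money).length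
      - (((PySem.Int.toChars money).reverse.dropWhile (fun c => c = '0')).reverse).length
      = zfun (PySem.Int.toChars money) := by
    have hsp := List.takeWhile_append_dropWhile
      (p := fun c => decide (c = '0')) (l := (PySem.Int.toChars money).reverse)
    have hlen := congrArg List.length hsp
    rw [List.length_append, List.length_reverse] at hlen
    unfold zfun
    rw [List.length_reverse]
    omega
  rw [hz]
  rfl
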